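-- pv_equiv track=rewrite | github.com/Gadoli/LeetCode | src/easy1.py | endOfValidNums
-- ===== SOURCE A (Python) =====
-- def endOfValidNums(nums, target):
--     """This function is used in order to reduce nums' length so it will optimize search algorithims
--         if the solution is found, it will return the two values in a List
--         otherwise in will return the cutted List
--     """
--
--     a = 0
--     b = len(nums)
--     halfpow = (a+b)//2
--
--     while (b-a)>1:
--         tmp = nums[halfpow]
--         tmp_0 = nums[0]
--         if (tmp==target & (0 in nums)):
--             return sorted([0,tmp])
--
--         if (tmp+tmp_0==target):
--             return sorted([tmp_0,tmp])
--
--         if (tmp+nums[0]>target):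
--             b = halfpow
--             halfpow = (a+b)//2
--
--         else:
--             a = halfpow
--             halfpow = (a+b)//2
--
--     return nums[0:halfpow+1]
-- ===== SOURCE B (Python) =====
-- def endOfValidNums(nums, target):
--     # Recursive divide-and-conquer over the interval [a, b) instead of an
--     # iterative loop; the two-element results are built with min/max directly.
--     def go(a, b):
--         h = (a + b) // 2
--         if b - a <= 1:
--             return nums[:h + 1]
--         v, first = nums[h], nums[0]
--         if v == target & (0 in nums):
--             return [min(0, v), max(0, v)]
--         if v + first == target:
--             return [min(first, v), max(first, v)]
--         if v + first > target:
--             return go(a, h)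
--         return go(h, b)
--
--     return go(0, len(nums))
-- ===== Notes on version B (the rewrite author's own statement) =====
-- stated objective: alternative
-- what changed: The iterative while-loop narrowing is rewritten as a recursive helper go(a, b) over the interval, and the sorted([x, y]) calls on two-element lists become direct min/max pair construction.
import Mathlib
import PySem

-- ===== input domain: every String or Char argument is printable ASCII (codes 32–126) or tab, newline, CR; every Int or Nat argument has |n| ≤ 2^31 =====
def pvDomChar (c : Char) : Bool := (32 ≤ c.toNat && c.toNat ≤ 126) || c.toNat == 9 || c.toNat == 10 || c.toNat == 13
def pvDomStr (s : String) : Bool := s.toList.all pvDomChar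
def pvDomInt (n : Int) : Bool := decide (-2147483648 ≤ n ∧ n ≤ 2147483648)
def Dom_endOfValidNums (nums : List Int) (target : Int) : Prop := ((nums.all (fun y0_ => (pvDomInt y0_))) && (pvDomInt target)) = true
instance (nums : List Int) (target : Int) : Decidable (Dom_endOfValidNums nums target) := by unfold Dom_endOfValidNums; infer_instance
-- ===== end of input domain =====

-- B rewrites the iterative narrowing as a recursive helper over the interval and builds the
-- two-element results with min/max instead of sorted(); same cost, different decomposition.

-- ===== PORT A =====
-- A's while-loop as fuel recursion (fuel = the initial interval width, which strictly shrinks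
-- each iteration, so the fuel-0 arm coincides with the loop-exit arm).  A keeps halfpow always
-- equal to (a+b)//2 of the current a,b (set before the loop and re-set at the bottom of each
-- iteration), so the loop state is (a,b) and halfpow is recomputed where used.
-- 'tmp == target & (0 in nums)' parses as tmp == (target & bool) — ported with PySem.Int.band.
-- The 'none' match arms are unreachable (indices stay in range; A never raises).
def endOfValidNumsLoop (nums : List Int) (target : Int) : Nat → Int → Int → List Int
  | 0, a, b => PySem.List.slice nums (some 0) (some (PySem.Int.floordiv (a + b) 2 + 1))
  | fuel + 1, a, b =>
    if b - a > 1 then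
      match PySem.List.pyGet? nums (PySem.Int.floordiv (a + b) 2), PySem.List.pyGet? nums 0 with
      | some tmp, some tmp0 =>
        if tmp = PySem.Int.band target (if (0:Int) ∈ nums then 1 else 0) then
          PySem.List.sorted [0, tmp] (fun v => v) false
        else if tmp + tmp0 = target then
          PySem.List.sorted [tmp0, tmp] (fun v => v) false
        else if tmp + tmp0 > target then
          endOfValidNumsLoop nums target fuel a (PySem.Int.floordiv (a + b) 2)
        else
          endOfValidNumsLoop nums target fuel (PySem.Int.floordiv (a + b) 2) b
      | _, _ => []
    else
      PySem.List.slice nums (some 0) (some (PySem.Int.floordiv (a + b) 2 + 1))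

def endOfValidNums (nums : List Int) (target : Int) : List Int :=
  endOfValidNumsLoop nums target nums.length 0 (PySem.List.len nums)

-- ===== PORT B =====
-- go(a,b) of Source B, with the same fuel discipline; h is computed once per call ('let').
def endOfValidNumsGo (nums : List Int) (target : Int) : Nat → Int → Int → List Int
  | 0, a, b => PySem.List.slice nums none (some (PySem.Int.floordiv (a + b) 2 + 1))
  | fuel + 1, a, b =>
    let h := PySem.Int.floordiv (a + b) 2
    if b - a ≤ 1 then
      PySem.List.slice nums none (some (h + 1))
    else
      match PySem.List.pyGet? nums h, PySem.List.pyGet? nums 0 with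
      | some v, some first =>
        if v = PySem.Int.band target (if (0:Int) ∈ nums then 1 else 0) then
          [min 0 v, max 0 v]
        else if v + first = target then
          [min first v, max first v]
        else if v + first > target then
          endOfValidNumsGo nums target fuel a h
        else
          endOfValidNumsGo nums target fuel h b
      | _, _ => []

def endOfValidNums_alt (nums : List Int) (target : Int) : List Int :=
  endOfValidNumsGo nums target nums.length 0 (PySem.List.len nums)

-- ===== PRECONDITION & SPEC =====
def Spec_endOfValidNums (nums : List Int) (target : Int) (out : List Int) : Prop := out = endOfValidNums_alt nums target
instance (nums : List Int) (target : Int) (out : List Int) : Decidable (Spec_endOfValidNums nums target out) := by unfold Spec_endOfValidNums; infer_instance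

-- ===== CLAIM (what is proved, stated in full; the proofs are below) =====
def Claim_equal_endOfValidNums : Prop := ∀ (nums : List Int) (target : Int), Dom_endOfValidNums nums target → Spec_endOfValidNums nums target (endOfValidNums nums target)

-- ===== LEMMAS AND PROOFS =====

-- sorted of a two-element Int list equals the min/max pair
lemma sorted_pair (x y : Int) :
    PySem.List.sorted [x, y] (fun v => v) false = [min x y, max x y] := by
  simp [PySem.List.sorted, PySem.List.insertBy]
  by_cases h : x ≤ y
  · simp [not_lt.mpr h, min_eq_left h, max_eq_right h]
  · have h' : y < x := lt_of_not_ge h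
    simp [h', min_eq_right h'.le, max_eq_left h'.le]

lemma loop_eq_go (nums : List Int) (target : Int) :
    ∀ (k : Nat) (a b : Int),
      endOfValidNumsLoop nums target k a b = endOfValidNumsGo nums target k a b := by
  intro k
  induction k with
  | zero => intro a b; simp [endOfValidNumsLoop, endOfValidNumsGo, PySem.List.slice]
  | succ k ih =>
    intro a b
    rw [endOfValidNumsLoop, endOfValidNumsGo]
    by_cases hgt : b - a > 1
    · rw [if_pos hgt]
      simp only [if_neg (by omega : ¬ b - a ≤ 1)]
      cases PySem.List.pyGet? nums (PySem.Int.floordiv (a + b) 2) with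
      | none => cases PySem.List.pyGet? nums 0 <;> rfl
      | some tmp =>
        cases PySem.List.pyGet? nums 0 with
        | none => rfl
        | some tmp0 =>
          simp only [sorted_pair]
          split_ifs <;> first | rfl | exact ih _ _
    · rw [if_neg hgt]
      simp only [if_pos (by omega : b - a ≤ 1)]
      simp [PySem.List.slice]

-- ===== VERDICT =====
theorem endOfValidNums_spec : Claim_equal_endOfValidNums := by
  intro nums target _hdom
  unfold Spec_endOfValidNums endOfValidNums endOfValidNums_alt
  exact loop_eq_go nums target nums.length 0 (PySem.List.len nums)
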